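-- pv_equiv track=rewrite | github.com/ASSERT-KTH/Mokav | experiments/pynguin/c4b/return-lst/generated_tests/src_214/0/src_214.py | func
-- ===== SOURCE A (Python) =====
-- def func(*args):
-- 	ret_values = []
--
-- 	l = ['Sheldon', 'Leonard', 'Penny', 'Rajesh', 'Howard']
-- 	n = (int(args[0]) - 1)
-- 	p = 0
-- 	w = (- 1)
-- 	while True:
-- 	    w += 1
-- 	    p += (5 * (2 ** w))
-- 	    if (p > n):
-- 	        p -= (5 * (2 ** w))
-- 	        k = (n - p)
-- 	        ret_values.append(l[(k // (2 ** w))])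
-- 	        break
--
-- 	return ret_values
-- ===== SOURCE B (Python) =====
-- def func(*args):
--     l = ['Sheldon', 'Leonard', 'Penny', 'Rajesh', 'Howard']
--     n = int(args[0]) - 1
--     w = max(0, (n // 5 + 1).bit_length() - 1)
--     k = n - 5 * (2 ** w - 1)
--     return [l[k // (2 ** w)]]
-- ===== Notes on version B (the rewrite author's own statement) =====
-- stated objective: faster
-- what changed: Replaces A's doubling-group accumulation loop with a closed-form computation of the group index via bit_length and floor division.
import Mathlib
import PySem

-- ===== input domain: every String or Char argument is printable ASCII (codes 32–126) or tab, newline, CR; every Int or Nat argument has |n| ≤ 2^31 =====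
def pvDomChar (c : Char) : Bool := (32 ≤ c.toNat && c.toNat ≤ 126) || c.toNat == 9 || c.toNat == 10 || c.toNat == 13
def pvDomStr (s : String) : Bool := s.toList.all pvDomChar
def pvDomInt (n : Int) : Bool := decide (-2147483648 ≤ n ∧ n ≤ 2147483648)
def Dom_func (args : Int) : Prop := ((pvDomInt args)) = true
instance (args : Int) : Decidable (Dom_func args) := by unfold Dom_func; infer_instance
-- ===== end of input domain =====

-- B replaces A's accumulation loop by a closed-form computation of the doubling-group
-- index from bit_length (objective: faster, O(1) arithmetic instead of the loop).

-- ===== PORT A =====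
def pvNames : List String := ["Sheldon", "Leonard", "Penny", "Rajesh", "Howard"]

-- A's 'while True' loop: state (p, w); w here is the value AFTER the 'w += 1' of the
-- current iteration (A starts w at -1, so the first iteration runs with w = 0).
def funcLoopA (n p : Int) (w : Nat) : List String :=
  if p + 5 * 2 ^ w > n then
    match PySem.List.pyGet? pvNames (PySem.Int.floordiv (n - p) (2 ^ w)) with
    | some x => [x]
    | none => []          -- IndexError in Python; excluded by Pre_func
  else funcLoopA n (p + 5 * 2 ^ w) (w + 1)
termination_by (n - p).toNat
decreasing_by
  have h1 : (1 : Int) ≤ 2 ^ w := one_le_pow₀ (by norm_num)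
  omega

def func (args : Int) : List String := funcLoopA (args - 1) 0 0

-- ===== PORT B =====
def func_alt (args : Int) : List String :=
  let n := args - 1
  let w : Nat := (max 0 ((PySem.Int.bitLength (PySem.Int.floordiv n 5 + 1) : Int) - 1)).toNat
  let k := n - 5 * (2 ^ w - 1)
  match PySem.List.pyGet? pvNames (PySem.Int.floordiv k (2 ^ w)) with
  | some x => [x]
  | none => []            -- IndexError in Python; excluded by Pre_func

-- ===== PRECONDITION & SPEC =====
-- Both A and B raise IndexError exactly when args ≤ -5 (the index n = args - 1 falls
-- below -len(l)); those inputs are excluded.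
def Pre_func (args : Int) : Prop := -4 ≤ args
instance (args : Int) : Decidable (Pre_func args) := by unfold Pre_func; infer_instance
def pvWitness_func : Int := (7)

def Spec_func (args : Int) (out : List String) : Prop := out = func_alt args
instance (args : Int) (out : List String) : Decidable (Spec_func args out) := by unfold Spec_func; infer_instance

-- ===== CLAIM (what is proved, stated in full; the proofs are below) =====
def Claim_equal_func : Prop := ∀ (args : Int), Dom_func args → Pre_func args → Spec_func args (func args)

-- ===== LEMMAS AND PROOFS =====

-- the value A returns once the loop stops at group W
def pvPick (n : Int) (W : Nat) : List String :=
  match PySem.List.pyGet? pvNames (PySem.Int.floordiv (n - 5 * (2 ^ W - 1)) (2 ^ W)) with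
  | some x => [x]
  | none => []

lemma funcLoopA_spec (m : Nat) : ∀ (n : Int) (w : Nat),
    (n - 5 * (2 ^ w - 1)).toNat ≤ m → 5 * ((2:Int) ^ w - 1) ≤ n →
    ∃ W, w ≤ W ∧ 5 * ((2:Int) ^ W - 1) ≤ n ∧ n < 5 * (2 ^ (W + 1) - 1) ∧
      funcLoopA n (5 * (2 ^ w - 1)) w = pvPick n W := by
  induction m with
  | zero =>
    intro n w hm hle
    have h1 : (1 : Int) ≤ 2 ^ w := one_le_pow₀ (by norm_num)
    have hn : n = 5 * (2 ^ w - 1) := by omega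
    refine ⟨w, le_refl _, hle, by rw [pow_succ]; omega, ?_⟩
    rw [funcLoopA, if_pos (by omega)]
    rfl
  | succ m ih =>
    intro n w hm hle
    have h1 : (1 : Int) ≤ 2 ^ w := one_le_pow₀ (by norm_num)
    by_cases hstop : 5 * ((2:Int) ^ w - 1) + 5 * 2 ^ w > n
    · refine ⟨w, le_refl _, hle, by rw [pow_succ]; omega, ?_⟩
      rw [funcLoopA, if_pos hstop]
      rfl
    · push Not at hstop
      have hrec : 5 * ((2:Int) ^ w - 1) + 5 * 2 ^ w = 5 * (2 ^ (w + 1) - 1) := by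
        rw [pow_succ]; ring
      have hle' : 5 * ((2:Int) ^ (w + 1) - 1) ≤ n := by rw [← hrec]; exact hstop
      have hm' : (n - 5 * ((2:Int) ^ (w + 1) - 1)).toNat ≤ m := by
        rw [← hrec]; omega
      obtain ⟨W, hW1, hW2, hW3, hW4⟩ := ih n (w + 1) hm' hle'
      refine ⟨W, by omega, hW2, hW3, ?_⟩
      rw [funcLoopA, if_neg (by push Not; exact hstop), hrec]
      exact hW4

-- the group is unique
lemma group_unique (n : Int) (W W' : Nat)
    (h1 : 5 * ((2:Int) ^ W - 1) ≤ n) (h2 : n < 5 * (2 ^ (W + 1) - 1))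
    (h3 : 5 * ((2:Int) ^ W' - 1) ≤ n) (h4 : n < 5 * (2 ^ (W' + 1) - 1)) : W = W' := by
  by_contra hne
  rcases Nat.lt_or_ge W W' with h | h
  · have : (2:Int) ^ (W + 1) ≤ 2 ^ W' := pow_le_pow_right₀ (by norm_num) (by omega)
    omega
  · have hW'W : W' < W := by omega
    have : (2:Int) ^ (W' + 1) ≤ 2 ^ W := pow_le_pow_right₀ (by norm_num) (by omega)
    omega

-- B's bit_length formula lands in the same group (for n ≥ 0)
lemma alt_group (n : Int) (hn : 0 ≤ n) :
    5 * ((2:Int) ^ ((max 0 ((PySem.Int.bitLength (PySem.Int.floordiv n 5 + 1) : Int) - 1)).toNat) - 1) ≤ n ∧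
    n < 5 * (2 ^ ((max 0 ((PySem.Int.bitLength (PySem.Int.floordiv n 5 + 1) : Int) - 1)).toNat + 1) - 1) := by
  set q := PySem.Int.floordiv n 5 with hq
  have hdm := PySem.Int.floordiv_mul_add_mod n 5
  have hmod1 : 0 ≤ PySem.Int.mod n 5 := by
    have := PySem.Int.mod_eq_emod_of_pos (a := n) (b := 5) (by norm_num); rw [this]; omega
  have hmod2 : PySem.Int.mod n 5 < 5 := by
    have := PySem.Int.mod_eq_emod_of_pos (a := n) (b := 5) (by norm_num); rw [this]; omega
  have hq0 : 0 ≤ q := by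
    have := PySem.Int.floordiv_eq_ediv_of_pos (a := n) (b := 5) (by norm_num)
    rw [hq, this]; exact Int.ediv_nonneg hn (by norm_num)
  have hm1 : q + 1 ≠ 0 := by omega
  have hna : (q + 1).natAbs = (q + 1).toNat := by omega
  have hbl : PySem.Int.bitLength (q + 1) ≥ 1 := by
    have := PySem.Int.lt_two_pow_bitLength (q + 1)
    by_contra hc
    have hz : PySem.Int.bitLength (q + 1) = 0 := by omega
    rw [hz] at this; simp at this; omega
  set B := PySem.Int.bitLength (q + 1) with hB
  have hmax : (max 0 ((B : Int) - 1)).toNat = B - 1 := by omega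
  rw [hmax]
  have hub : (q + 1).natAbs < 2 ^ B := PySem.Int.lt_two_pow_bitLength (q + 1)
  have hlb : 2 ^ (B - 1) ≤ (q + 1).natAbs := PySem.Int.two_pow_bitLength_le (q + 1) hm1
  -- move to Int
  have hcast : (((q + 1).natAbs : Nat) : Int) = q + 1 := Int.natAbs_of_nonneg (by omega)
  have hubZ : q + 1 < (2:Int) ^ B := by
    have h3 : (((q + 1).natAbs : Nat) : Int) < ((2 ^ B : Nat) : Int) := by exact_mod_cast hub
    rw [hcast] at h3; push_cast at h3; exact h3
  have hlbZ : (2:Int) ^ (B - 1) ≤ q + 1 := by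
    have h3 : ((2 ^ (B - 1) : Nat) : Int) ≤ (((q + 1).natAbs : Nat) : Int) := by exact_mod_cast hlb
    rw [hcast] at h3; push_cast at h3; exact h3
  have hsucc : B - 1 + 1 = B := by omega
  constructor
  · omega
  · rw [hsucc]; omega

lemma main_eq (args : Int) (h : -4 ≤ args) : func args = func_alt args := by
  rcases le_or_gt args 5 with hsmall | hbig
  · -- n = args - 1 ∈ [-5, 4]: one loop iteration, and B's w is 0
    interval_cases args <;> · rw [func, funcLoopA, if_pos (by norm_num)] ; decide
  · -- n ≥ 5
    set n := args - 1 with hn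
    have hn0 : (0:Int) ≤ n := by omega
    obtain ⟨W, _, hW2, hW3, hW4⟩ :=
      funcLoopA_spec (n - 0).toNat n 0 (by norm_num) (by simpa using hn0)
    have halt := alt_group n hn0
    set wB := (max 0 ((PySem.Int.bitLength (PySem.Int.floordiv n 5 + 1) : Int) - 1)).toNat with hwB
    have hWeq : W = wB := group_unique n W wB hW2 hW3 halt.1 halt.2
    have hA : func args = pvPick n W := by
      rw [func, ← hn]
      have : (5:Int) * (2 ^ 0 - 1) = 0 := by norm_num
      rw [← this]
      exact hW4
    rw [hA, hWeq, func_alt, pvPick]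

theorem pvWitness_ok : Dom_func pvWitness_func ∧ Pre_func pvWitness_func := by
  constructor <;> decide

-- ===== VERDICT (by name: the statement is the Claim_ definition above) =====
theorem func_spec : Claim_equal_func := by
  intro args _ hpre
  unfold Spec_func
  exact main_eq args hpre
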